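-- pv_equiv track=rewrite | github.com/erturkmemmedli/Leet-Code-Solutions | 2501-3000/2713_maxIncreasingCells.py | maxIncreasingCells
-- ===== SOURCE A (Python) =====
-- from typing import List
--
-- def maxIncreasingCells(mat: List[List[int]]) -> int:
--     m, n = len(mat), len(mat[0])
--     memo = {}
--
--     def backtrack(r, c):
--         if (r, c) in memo:
--             return memo[(r, c)]
--
--         ans = 1
--
--         for row in range(m):
--             if row != r and mat[row][c] > mat[r][c]:
--                 ans = max(ans, 1 + backtrack(row, c))
--
--         for col in range(n):
--             if col != c and mat[r][col] > mat[r][c]: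
--                 ans = max(ans, 1 + backtrack(r, col))
--
--         memo[(r, c)] = ans
--         return ans
--
--     max_path = 0
--
--     for i in range(m):
--         for j in range(n):
--             max_path = max(max_path, backtrack(i, j))
--
--     return max_path
-- ===== SOURCE B (Python) =====
-- from typing import List
--
-- def maxIncreasingCells(mat: List[List[int]]) -> int:
--     # Sort cells by value descending; process equal-value groups at once,
--     # keeping the best path length starting in each row / column.
--     m, n = len(mat), len(mat[0])
--     cells = sorted(((mat[i][j], i, j) for i in range(m) for j in range(n)),
--                    key=lambda t: t[0], reverse=True)
--     row_best = [0] * m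
--     col_best = [0] * n
--     best = 0
--     k = 0
--     while k < len(cells):
--         j = k
--         while j < len(cells) and cells[j][0] == cells[k][0]:
--             j += 1
--         group = cells[k:j]
--         vals = [1 + max(row_best[r], col_best[c]) for _, r, c in group]
--         for (_, r, c), d in zip(group, vals):
--             if d > row_best[r]:
--                 row_best[r] = d
--             if d > col_best[c]:
--                 col_best[c] = d
--             if d > best:
--                 best = d
--         k = j
--     return best
-- ===== Notes on version B (the rewrite author's own statement) =====
-- stated objective: faster
-- what changed: A runs a memoized recursion that rescans the full row and column for every cell (O(mn(m+n))); B sorts all cells by value once and sweeps them in descending equal-value groups, maintaining the best path length per row and per column, so each cell is handled in O(1) after the O(mn log(mn)) sort.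
import Mathlib
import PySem

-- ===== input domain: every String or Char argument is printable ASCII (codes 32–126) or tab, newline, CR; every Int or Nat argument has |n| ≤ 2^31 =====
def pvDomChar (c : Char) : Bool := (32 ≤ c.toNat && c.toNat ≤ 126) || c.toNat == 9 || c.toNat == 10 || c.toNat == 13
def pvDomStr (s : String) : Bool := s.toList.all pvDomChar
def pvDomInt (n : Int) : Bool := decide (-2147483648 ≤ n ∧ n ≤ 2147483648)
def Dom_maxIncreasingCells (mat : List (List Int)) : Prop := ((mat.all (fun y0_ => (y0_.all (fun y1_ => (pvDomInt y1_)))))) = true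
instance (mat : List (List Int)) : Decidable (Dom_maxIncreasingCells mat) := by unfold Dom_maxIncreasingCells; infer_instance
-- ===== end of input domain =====

-- B replaces A's memoized per-cell recursion (which rescans the whole row and column
-- for every cell) by one sort of all cells by value, processed in descending
-- equal-value groups while maintaining the best path length per row and per column.

-- ===== PORT A =====
-- mat[r][c]; A only reads indices that are in range under Pre_, so the default is never used there
def pvMatv (mat : List (List Int)) (r c : Nat) : Int := (mat.getD r []).getD c 0

-- A's memoized `backtrack`, with the memo dict threaded through and a fuel argument
-- that only makes the recursion structural (with fuel > #strictly-larger cells it never runs out)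
def pvBack (mat : List (List Int)) (m n : Nat) :
    Nat → PySem.Dict (Nat × Nat) Nat → Nat → Nat → Nat × PySem.Dict (Nat × Nat) Nat
  | 0, memo, _, _ => (0, memo)
  | fuel+1, memo, r, c =>
    match memo.get? (r, c) with
    | some x => (x, memo)
    | none =>
      let st1 := (List.range m).foldl (fun (st : Nat × PySem.Dict (Nat × Nat) Nat) row =>
          if row ≠ r ∧ pvMatv mat row c > pvMatv mat r c then
            let p := pvBack mat m n fuel st.2 row c
            (max st.1 (1 + p.1), p.2)
          else st) (1, memo)
      let st2 := (List.range n).foldl (fun (st : Nat × PySem.Dict (Nat × Nat) Nat) col =>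
          if col ≠ c ∧ pvMatv mat r col > pvMatv mat r c then
            let p := pvBack mat m n fuel st.2 r col
            (max st.1 (1 + p.1), p.2)
          else st) st1
      (st2.1, st2.2.insert (r, c) st2.1)

def maxIncreasingCells (mat : List (List Int)) : Int :=
  let m := mat.length
  let n := (mat.headD []).length
  let st := (List.range m).foldl (fun (st : Nat × PySem.Dict (Nat × Nat) Nat) i =>
      (List.range n).foldl (fun st j =>
        let p := pvBack mat m n (m*n+1) st.2 i j
        (max st.1 p.1, p.2)) st) (0, PySem.Dict.empty)
  (st.1 : Int)

-- ===== PORT B =====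
-- Source B's outer while-loop over the sorted cells: take the leading equal-value group,
-- compute its path lengths from row_best/col_best, then apply the updates.
-- The fuel argument only makes the recursion structural (call sites pass length+1).
def pvProcess : Nat → List (Int × Nat × Nat) → List Nat → List Nat → Nat → Nat
  | 0, _, _, _, best => best
  | _+1, [], _, _, best => best
  | fuel+1, t :: ts, rb, cb, best =>
    let group := (t :: ts).takeWhile (fun u => u.1 == t.1)
    let rest := (t :: ts).dropWhile (fun u => u.1 == t.1)
    let vals := group.map (fun u => 1 + max (rb.getD u.2.1 0) (cb.getD u.2.2 0))
    let st := (group.zip vals).foldl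
        (fun (st : List Nat × List Nat × Nat) p =>
          let d := p.2
          let rb' := if d > st.1.getD p.1.2.1 0 then st.1.set p.1.2.1 d else st.1
          let cb' := if d > st.2.1.getD p.1.2.2 0 then st.2.1.set p.1.2.2 d else st.2.1
          let best' := if d > st.2.2 then d else st.2.2
          (rb', cb', best')) (rb, cb, best)
    pvProcess fuel rest st.1 st.2.1 st.2.2

def maxIncreasingCells_alt (mat : List (List Int)) : Int :=
  let m := mat.length
  let n := (mat.headD []).length
  let cells := PySem.List.sorted
      ((List.range m).flatMap (fun i => (List.range n).map (fun j => (pvMatv mat i j, i, j))))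
      (fun t => t.1) true
  (pvProcess (cells.length + 1) cells (List.replicate m 0) (List.replicate n 0) 0 : Nat)

-- ===== PRECONDITION & SPEC =====
-- Pre_ excludes exactly the inputs where Python A raises IndexError: the empty matrix
-- (mat[0]) and matrices with a row shorter than row 0 (mat[row][c] with c < len(mat[0])).
def Pre_maxIncreasingCells (mat : List (List Int)) : Prop :=
  mat ≠ [] ∧ ∀ row ∈ mat, (mat.headD []).length ≤ row.length
instance (mat : List (List Int)) : Decidable (Pre_maxIncreasingCells mat) := by
  unfold Pre_maxIncreasingCells; infer_instance

def pvWitness_maxIncreasingCells : List (List Int) := [[1, 2], [3, 4]]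

def Spec_maxIncreasingCells (mat : List (List Int)) (out : Int) : Prop := out = maxIncreasingCells_alt mat
instance (mat : List (List Int)) (out : Int) : Decidable (Spec_maxIncreasingCells mat out) := by
  unfold Spec_maxIncreasingCells; infer_instance

-- ===== CLAIM (what is proved, stated in full; the proofs are below) =====
def Claim_equal_maxIncreasingCells : Prop := ∀ (mat : List (List Int)), Dom_maxIncreasingCells mat → Pre_maxIncreasingCells mat → Spec_maxIncreasingCells mat (maxIncreasingCells mat)

-- ===== LEMMAS AND PROOFS =====

-- the common reference value: pvG mat m n r c is the length of the longest strictly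
-- increasing path starting at (r, c), defined through a fueled recurrence

def pvBigger (mat : List (List Int)) (m n r c : Nat) : Nat :=
  ((Finset.range m ×ˢ Finset.range n).filter
    (fun p => pvMatv mat p.1 p.2 > pvMatv mat r c)).card

def pvGF (mat : List (List Int)) (m n : Nat) : Nat → Nat → Nat → Nat
  | 0, _, _ => 0
  | fuel+1, r, c =>
    let a1 := (List.range m).foldl (fun a row =>
        if row ≠ r ∧ pvMatv mat row c > pvMatv mat r c then max a (1 + pvGF mat m n fuel row c) else a) 1
    (List.range n).foldl (fun a col =>
        if col ≠ c ∧ pvMatv mat r col > pvMatv mat r c then max a (1 + pvGF mat m n fuel r col) else a) a1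

def pvG (mat : List (List Int)) (m n r c : Nat) : Nat :=
  pvGF mat m n (pvBigger mat m n r c + 1) r c

def pvRowSup (mat : List (List Int)) (m n r : Nat) (v : Int) : Nat :=
  ((Finset.range n).filter (fun c' => pvMatv mat r c' > v)).sup (fun c' => pvG mat m n r c')

def pvColSup (mat : List (List Int)) (m n c : Nat) (v : Int) : Nat :=
  ((Finset.range m).filter (fun r' => pvMatv mat r' c > v)).sup (fun r' => pvG mat m n r' c)

def pvAllSup (mat : List (List Int)) (m n : Nat) : Nat :=
  (Finset.range m ×ˢ Finset.range n).sup (fun p => pvG mat m n p.1 p.2)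

lemma pvBigger_lt (mat : List (List Int)) (m n r c r' c' : Nat)
    (hr : r' < m) (hc : c' < n) (hv : pvMatv mat r' c' > pvMatv mat r c) :
    pvBigger mat m n r' c' < pvBigger mat m n r c := by
  apply Finset.card_lt_card
  constructor
  · intro p hp
    simp only [Finset.mem_filter] at hp ⊢
    exact ⟨hp.1, lt_trans hv hp.2⟩
  · intro hsub
    have h1 : (r', c') ∈ (Finset.range m ×ˢ Finset.range n).filter
        (fun p => pvMatv mat p.1 p.2 > pvMatv mat r c) := by
      simp [Finset.mem_filter, Finset.mem_product, hr, hc, hv]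
    have h2 := hsub h1
    simp only [Finset.mem_filter] at h2
    exact lt_irrefl _ h2.2

lemma foldl_max_congr {α : Type} (l : List α) (f g : α → Nat) (p : α → Prop) [DecidablePred p]
    (h : ∀ x ∈ l, p x → f x = g x) (init : Nat) :
    l.foldl (fun a x => if p x then max a (f x) else a) init
      = l.foldl (fun a x => if p x then max a (g x) else a) init := by
  induction l generalizing init with
  | nil => rfl
  | cons y ys ih =>
    simp only [List.foldl_cons]
    rw [show (if p y then max init (f y) else init) = (if p y then max init (g y) else init) by
      by_cases hp : p y <;> simp [hp, h y (by simp)]]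
    exact ih (fun x hx hp => h x (by simp [hx]) hp) _

lemma pvGF_eq_pvG (mat : List (List Int)) (m n : Nat) :
    ∀ b r c fuel, r < m → c < n → pvBigger mat m n r c = b → b < fuel →
      pvGF mat m n fuel r c = pvG mat m n r c := by
  intro b
  induction b using Nat.strong_induction_on with
  | _ b ih =>
    intro r c fuel hr hc hb hf
    obtain ⟨f, rfl⟩ : ∃ f, fuel = f + 1 := ⟨fuel - 1, by omega⟩
    unfold pvG
    rw [hb]
    show pvGF mat m n (f+1) r c = pvGF mat m n (b+1) r c
    simp only [pvGF]
    have hrow : ∀ row ∈ List.range m, (row ≠ r ∧ pvMatv mat row c > pvMatv mat r c) →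
        pvGF mat m n f row c = pvGF mat m n b row c := by
      intro row hrowm hp
      have hlt := pvBigger_lt mat m n r c row c (List.mem_range.mp hrowm) hc hp.2
      rw [hb] at hlt
      rw [ih _ hlt row c f (List.mem_range.mp hrowm) hc rfl (by omega),
          ih _ hlt row c b (List.mem_range.mp hrowm) hc rfl (by omega)]
    have hcol : ∀ col ∈ List.range n, (col ≠ c ∧ pvMatv mat r col > pvMatv mat r c) →
        pvGF mat m n f r col = pvGF mat m n b r col := by
      intro col hcolm hp
      have hlt := pvBigger_lt mat m n r c r col hr (List.mem_range.mp hcolm) hp.2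
      rw [hb] at hlt
      rw [ih _ hlt r col f hr (List.mem_range.mp hcolm) rfl (by omega),
          ih _ hlt r col b hr (List.mem_range.mp hcolm) rfl (by omega)]
    rw [foldl_max_congr (List.range m) (fun row => 1 + pvGF mat m n f row c)
          (fun row => 1 + pvGF mat m n b row c) _
          (fun x hx hp => show 1 + pvGF mat m n f x c = 1 + pvGF mat m n b x c by
            rw [hrow x hx hp]) 1]
    rw [foldl_max_congr (List.range n) (fun col => 1 + pvGF mat m n f r col)
          (fun col => 1 + pvGF mat m n b r col) _
          (fun x hx hp => show 1 + pvGF mat m n f r x = 1 + pvGF mat m n b r x by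
            rw [hcol x hx hp])]

-- fold with an if-max body over range k = max of init and the Finset sup over the filter
lemma foldl_if_max_eq_sup (k : Nat) (p : Nat → Prop) [DecidablePred p] (f : Nat → Nat) (init : Nat) :
    (List.range k).foldl (fun a x => if p x then max a (f x) else a) init
      = max init (((Finset.range k).filter p).sup f) := by
  induction k generalizing init with
  | zero => simp
  | succ k ih =>
    rw [List.range_succ, List.foldl_append, ih, Finset.range_add_one, Finset.filter_insert]
    simp only [List.foldl_cons, List.foldl_nil]
    by_cases hp : p k
    · simp only [hp, if_true, Finset.sup_insert]
      omega
    · simp [hp]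

lemma foldl_max_eq_sup (k : Nat) (f : Nat → Nat) (init : Nat) :
    (List.range k).foldl (fun a x => max a (f x)) init = max init ((Finset.range k).sup f) := by
  induction k generalizing init with
  | zero => simp
  | succ k ih =>
    rw [List.range_succ, List.foldl_append, ih, Finset.range_add_one, Finset.sup_insert]
    simp only [List.foldl_cons, List.foldl_nil]
    omega

lemma max_one_sup_add {α : Type} [DecidableEq α] (S : Finset α) (f : α → Nat) :
    max 1 (S.sup fun x => 1 + f x) = 1 + S.sup f := by
  induction S using Finset.induction_on with
  | empty => simp
  | insert a S ha ih =>
    rw [Finset.sup_insert, Finset.sup_insert]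
    omega

-- pvG satisfies the (pure) one-step unfolding of A's backtrack
lemma pvG_purefold (mat : List (List Int)) (m n r c : Nat) (hr : r < m) (hc : c < n) :
    pvG mat m n r c
      = (List.range n).foldl (fun a col =>
          if col ≠ c ∧ pvMatv mat r col > pvMatv mat r c then max a (1 + pvG mat m n r col) else a)
        ((List.range m).foldl (fun a row =>
          if row ≠ r ∧ pvMatv mat row c > pvMatv mat r c then max a (1 + pvG mat m n row c) else a) 1) := by
  conv_lhs => unfold pvG pvGF
  rw [foldl_max_congr (List.range m) (fun row => 1 + pvGF mat m n (pvBigger mat m n r c) row c)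
        (fun row => 1 + pvG mat m n row c) _
        (fun x hx hp => show 1 + pvGF mat m n (pvBigger mat m n r c) x c = 1 + pvG mat m n x c by
          have hxm := List.mem_range.mp hx
          have hlt := pvBigger_lt mat m n r c x c hxm hc hp.2
          rw [pvGF_eq_pvG mat m n (pvBigger mat m n x c) x c (pvBigger mat m n r c) hxm hc rfl hlt]) 1]
  rw [foldl_max_congr (List.range n) (fun col => 1 + pvGF mat m n (pvBigger mat m n r c) r col)
        (fun col => 1 + pvG mat m n r col) _
        (fun x hx hp => show 1 + pvGF mat m n (pvBigger mat m n r c) r x = 1 + pvG mat m n r x by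
          have hxn := List.mem_range.mp hx
          have hlt := pvBigger_lt mat m n r c r x hr hxn hp.2
          rw [pvGF_eq_pvG mat m n (pvBigger mat m n r x) r x (pvBigger mat m n r c) hr hxn rfl hlt])]

lemma pvG_closed (mat : List (List Int)) (m n r c : Nat) (hr : r < m) (hc : c < n) :
    pvG mat m n r c
      = 1 + max (pvRowSup mat m n r (pvMatv mat r c)) (pvColSup mat m n c (pvMatv mat r c)) := by
  rw [pvG_purefold mat m n r c hr hc, foldl_if_max_eq_sup, foldl_if_max_eq_sup]
  have e1 : ((Finset.range m).filter (fun row => row ≠ r ∧ pvMatv mat row c > pvMatv mat r c))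
      = ((Finset.range m).filter (fun r' => pvMatv mat r' c > pvMatv mat r c)) := by
    apply Finset.filter_congr
    intro x _
    constructor
    · exact fun h => h.2
    · intro h
      refine ⟨fun heq => ?_, h⟩
      rw [heq] at h
      exact lt_irrefl _ h
  have e2 : ((Finset.range n).filter (fun col => col ≠ c ∧ pvMatv mat r col > pvMatv mat r c))
      = ((Finset.range n).filter (fun c' => pvMatv mat r c' > pvMatv mat r c)) := by
    apply Finset.filter_congr
    intro x _
    constructor
    · exact fun h => h.2
    · intro h
      refine ⟨fun heq => ?_, h⟩
      rw [heq] at h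
      exact lt_irrefl _ h
  rw [e1, e2]
  have m1 := max_one_sup_add ((Finset.range m).filter (fun r' => pvMatv mat r' c > pvMatv mat r c))
      (fun r' => pvG mat m n r' c)
  have m2 := max_one_sup_add ((Finset.range n).filter (fun c' => pvMatv mat r c' > pvMatv mat r c))
      (fun c' => pvG mat m n r c')
  unfold pvRowSup pvColSup
  omega

-- ===== A side: the memoized recursion computes pvG =====

def pvInv (mat : List (List Int)) (m n : Nat) (memo : PySem.Dict (Nat × Nat) Nat) : Prop :=
  ∀ r c x, memo.get? (r, c) = some x → r < m ∧ c < n ∧ x = pvG mat m n r c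

-- threading the memo through one of backtrack's scanning loops
lemma pvFoldThread (mat : List (List Int)) (m n fuel : Nat)
    (row col : Nat → Nat) (q : Nat → Prop) [DecidablePred q]
    (l : List Nat)
    (hcall : ∀ x ∈ l, q x → ∀ memo, pvInv mat m n memo →
      (pvBack mat m n fuel memo (row x) (col x)).1 = pvG mat m n (row x) (col x)
        ∧ pvInv mat m n (pvBack mat m n fuel memo (row x) (col x)).2) :
    ∀ a memo, pvInv mat m n memo →
      ((l.foldl (fun (st : Nat × PySem.Dict (Nat × Nat) Nat) x =>
          if q x then
            (max st.1 (1 + (pvBack mat m n fuel st.2 (row x) (col x)).1),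
             (pvBack mat m n fuel st.2 (row x) (col x)).2)
          else st) (a, memo)).1
        = l.foldl (fun acc x => if q x then max acc (1 + pvG mat m n (row x) (col x)) else acc) a)
      ∧ pvInv mat m n ((l.foldl (fun (st : Nat × PySem.Dict (Nat × Nat) Nat) x =>
          if q x then
            (max st.1 (1 + (pvBack mat m n fuel st.2 (row x) (col x)).1),
             (pvBack mat m n fuel st.2 (row x) (col x)).2)
          else st) (a, memo)).2) := by
  induction l with
  | nil => exact fun a memo h => ⟨rfl, h⟩
  | cons y ys ih =>
    intro a memo hinv
    by_cases hq : q y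
    · simp only [List.foldl_cons, if_pos hq]
      have hy := hcall y (by simp) hq memo hinv
      rw [hy.1]
      exact ih (fun x hx => hcall x (by simp [hx])) _ _ hy.2
    · simp only [List.foldl_cons, if_neg hq]
      exact ih (fun x hx => hcall x (by simp [hx])) _ _ hinv

lemma pvBack_correct (mat : List (List Int)) (m n : Nat) :
    ∀ fuel r c memo, r < m → c < n → pvBigger mat m n r c < fuel → pvInv mat m n memo →
      (pvBack mat m n fuel memo r c).1 = pvG mat m n r c
        ∧ pvInv mat m n (pvBack mat m n fuel memo r c).2 := by
  intro fuel
  induction fuel with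
  | zero => intro r c memo _ _ h _; omega
  | succ fuel ih =>
    intro r c memo hr hc hfuel hinv
    cases hmem : memo.get? (r, c) with
    | some x =>
      have hx := hinv r c x hmem
      simp only [pvBack, hmem]
      exact ⟨hx.2.2, hinv⟩
    | none =>
      have h1 := pvFoldThread mat m n fuel (fun x => x) (fun _ => c)
          (fun x => x ≠ r ∧ pvMatv mat x c > pvMatv mat r c) (List.range m)
          (fun x hx hq memo' hinv' => ih x c memo' (List.mem_range.mp hx) hc
            (by have := pvBigger_lt mat m n r c x c (List.mem_range.mp hx) hc hq.2; omega) hinv')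
          1 memo hinv
      set st1 := (List.range m).foldl (fun (st : Nat × PySem.Dict (Nat × Nat) Nat) x =>
          if x ≠ r ∧ pvMatv mat x c > pvMatv mat r c then
            (max st.1 (1 + (pvBack mat m n fuel st.2 x c).1),
             (pvBack mat m n fuel st.2 x c).2)
          else st) (1, memo) with hst1
      have h2 := pvFoldThread mat m n fuel (fun _ => r) (fun x => x)
          (fun x => x ≠ c ∧ pvMatv mat r x > pvMatv mat r c) (List.range n)
          (fun x hx hq memo' hinv' => ih r x memo' hr (List.mem_range.mp hx)
            (by have := pvBigger_lt mat m n r c r x hr (List.mem_range.mp hx) hq.2; omega) hinv')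
          st1.1 st1.2 h1.2
      set st2 := (List.range n).foldl (fun (st : Nat × PySem.Dict (Nat × Nat) Nat) x =>
          if x ≠ c ∧ pvMatv mat r x > pvMatv mat r c then
            (max st.1 (1 + (pvBack mat m n fuel st.2 r x).1),
             (pvBack mat m n fuel st.2 r x).2)
          else st) (st1.1, st1.2) with hst2
      have hval : st2.1 = pvG mat m n r c := by
        rw [h2.1, h1.1, pvG_purefold mat m n r c hr hc]
      have hres : pvBack mat m n (fuel+1) memo r c = (st2.1, st2.2.insert (r, c) st2.1) := by
        simp only [pvBack, hmem, hst1, hst2]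
      rw [hres]
      refine ⟨hval, ?_⟩
      intro r' c' x hx
      by_cases hpq : (r', c') = (r, c)
      · injection hpq with e1 e2
        subst e1; subst e2
        rw [PySem.Dict.get?_insert_self] at hx
        injection hx with e3
        exact ⟨hr, hc, by rw [← e3, hval]⟩
      · rw [PySem.Dict.get?_insert_of_ne _ _ hpq] at hx
        exact h2.2 r' c' x hx

lemma pvBigger_le (mat : List (List Int)) (m n r c : Nat) :
    pvBigger mat m n r c ≤ m * n := by
  calc pvBigger mat m n r c ≤ (Finset.range m ×ˢ Finset.range n).card := Finset.card_filter_le _ _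
  _ = m * n := by rw [Finset.card_product, Finset.card_range, Finset.card_range]

lemma pvTopInner (mat : List (List Int)) (m n i : Nat) (hi : i < m)
    (l : List Nat) (hl : ∀ j ∈ l, j < n) :
    ∀ a memo, pvInv mat m n memo →
      ((l.foldl (fun (st : Nat × PySem.Dict (Nat × Nat) Nat) j =>
          (max st.1 (pvBack mat m n (m*n+1) st.2 i j).1,
           (pvBack mat m n (m*n+1) st.2 i j).2)) (a, memo)).1
        = l.foldl (fun acc j => max acc (pvG mat m n i j)) a)
      ∧ pvInv mat m n ((l.foldl (fun (st : Nat × PySem.Dict (Nat × Nat) Nat) j =>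
          (max st.1 (pvBack mat m n (m*n+1) st.2 i j).1,
           (pvBack mat m n (m*n+1) st.2 i j).2)) (a, memo)).2) := by
  induction l with
  | nil => exact fun a memo h => ⟨rfl, h⟩
  | cons y ys ih =>
    intro a memo hinv
    simp only [List.foldl_cons]
    have hy := pvBack_correct mat m n (m*n+1) i y memo hi (hl y (by simp))
      (by have := pvBigger_le mat m n i y; omega) hinv
    rw [hy.1]
    exact ih (fun j hj => hl j (by simp [hj])) _ _ hy.2

lemma pvTopOuter (mat : List (List Int)) (m n : Nat)
    (l : List Nat) (hl : ∀ i ∈ l, i < m) :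
    ∀ a memo, pvInv mat m n memo →
      ((l.foldl (fun (st : Nat × PySem.Dict (Nat × Nat) Nat) i =>
          (List.range n).foldl (fun st j =>
            (max st.1 (pvBack mat m n (m*n+1) st.2 i j).1,
             (pvBack mat m n (m*n+1) st.2 i j).2)) st) (a, memo)).1
        = l.foldl (fun acc i => (List.range n).foldl (fun acc j => max acc (pvG mat m n i j)) acc) a)
      ∧ pvInv mat m n ((l.foldl (fun (st : Nat × PySem.Dict (Nat × Nat) Nat) i =>
          (List.range n).foldl (fun st j =>
            (max st.1 (pvBack mat m n (m*n+1) st.2 i j).1,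
             (pvBack mat m n (m*n+1) st.2 i j).2)) st) (a, memo)).2) := by
  induction l with
  | nil => exact fun a memo h => ⟨rfl, h⟩
  | cons y ys ih =>
    intro a memo hinv
    simp only [List.foldl_cons]
    have hy := pvTopInner mat m n y (hl y (by simp)) (List.range n)
      (fun j hj => List.mem_range.mp hj) a memo hinv
    have h2 := ih (fun i hi => hl i (by simp [hi]))
      ((List.range n).foldl (fun (st : Nat × PySem.Dict (Nat × Nat) Nat) j =>
          (max st.1 (pvBack mat m n (m*n+1) st.2 y j).1,
           (pvBack mat m n (m*n+1) st.2 y j).2)) (a, memo)).1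
      ((List.range n).foldl (fun (st : Nat × PySem.Dict (Nat × Nat) Nat) j =>
          (max st.1 (pvBack mat m n (m*n+1) st.2 y j).1,
           (pvBack mat m n (m*n+1) st.2 y j).2)) (a, memo)).2
      hy.2
    refine ⟨?_, ?_⟩
    · rw [← hy.1]
      exact h2.1
    · exact h2.2

lemma pvInv_empty (mat : List (List Int)) (m n : Nat) :
    pvInv mat m n (PySem.Dict.empty : PySem.Dict (Nat × Nat) Nat) := by
  intro r c x hx
  simp [PySem.Dict.get?, PySem.Dict.empty] at hx

lemma maxA_eq_sup (mat : List (List Int)) :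
    maxIncreasingCells mat = (pvAllSup mat mat.length (mat.headD []).length : Nat) := by
  have h := pvTopOuter mat mat.length (mat.headD []).length (List.range mat.length)
    (fun i hi => List.mem_range.mp hi) 0 PySem.Dict.empty
    (pvInv_empty mat mat.length (mat.headD []).length)
  show (((List.range mat.length).foldl (fun (st : Nat × PySem.Dict (Nat × Nat) Nat) i =>
      (List.range (mat.headD []).length).foldl (fun st j =>
        (max st.1 (pvBack mat mat.length (mat.headD []).length
            (mat.length * (mat.headD []).length + 1) st.2 i j).1,
         (pvBack mat mat.length (mat.headD []).length
            (mat.length * (mat.headD []).length + 1) st.2 i j).2)) st)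
      (0, PySem.Dict.empty)).1 : Int) = _
  rw [h.1]
  congr 1
  simp only [foldl_max_eq_sup]
  simp only [pvAllSup, Finset.sup_product_left]
  exact (Nat.zero_max _).trans (by rfl)

-- ===== B side: group processing computes pvG =====

def pvPairs (l : List (Int × Nat × Nat)) : List (Nat × Nat) := l.map (fun t => (t.2.1, t.2.2))

def pvGood (mat : List (List Int)) (m n : Nat) (l : List (Int × Nat × Nat)) : Prop :=
  ∀ t ∈ l, t.2.1 < m ∧ t.2.2 < n ∧ t.1 = pvMatv mat t.2.1 t.2.2

-- the cells already consumed by the loop, as a set of coordinates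
def pvDone (mat : List (List Int)) (m n : Nat) (rest : List (Int × Nat × Nat)) : Finset (Nat × Nat) :=
  (Finset.range m ×ˢ Finset.range n).filter (fun p => (pvMatv mat p.1 p.2, p.1, p.2) ∉ rest)

lemma foldl_max_init {α : Type} (l : List α) (f : α → Nat) (z : Nat) :
    l.foldl (fun a u => max a (f u)) z = max z (l.foldl (fun a u => max a (f u)) 0) := by
  induction l generalizing z with
  | nil => simp
  | cons y ys ih =>
    simp only [List.foldl_cons]
    rw [ih (max z (f y)), ih (max 0 (f y))]
    omega

lemma list_max_eq_sup {α : Type} [DecidableEq α] (l : List α) (f : α → Nat) :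
    l.foldl (fun a u => max a (f u)) 0 = l.toFinset.sup f := by
  induction l with
  | nil => simp
  | cons y ys ih =>
    simp only [List.foldl_cons, List.toFinset_cons, Finset.sup_insert]
    rw [foldl_max_init, ih]
    omega

lemma foldl_max_congr_mem {α : Type} (l : List α) (f g : α → Nat) (h : ∀ x ∈ l, f x = g x) :
    ∀ a, l.foldl (fun a x => max a (f x)) a = l.foldl (fun a x => max a (g x)) a := by
  induction l with
  | nil => exact fun _ => rfl
  | cons y ys ih =>
    intro a
    simp only [List.foldl_cons]
    rw [h y (by simp)]
    exact ih (fun x hx => h x (by simp [hx])) _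

lemma pvZipSelfMap {α β : Type} (l : List α) (f : α → β) :
    l.zip (l.map f) = l.map (fun x => (x, f x)) := by
  induction l with
  | nil => rfl
  | cons x xs ih => simp [ih]

lemma pvDropWhile_lt (v : Int) : ∀ (l : List (Int × Nat × Nat)),
    l.Pairwise (fun a b => b.1 ≤ a.1) → (∀ u ∈ l, u.1 ≤ v) →
    ∀ u ∈ l.dropWhile (fun t => t.1 == v), u.1 < v := by
  intro l
  induction l with
  | nil => simp
  | cons h t ih =>
    intro hp hle u hu
    by_cases hh : h.1 = v
    · rw [List.dropWhile_cons_of_pos (by simp [hh])] at hu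
      exact ih (List.pairwise_cons.mp hp).2 (fun w hw => hle w (by simp [hw])) u hu
    · rw [List.dropWhile_cons_of_neg (by simp [hh])] at hu
      have hhv : h.1 < v := lt_of_le_of_ne (hle h (by simp)) hh
      rcases List.mem_cons.mp hu with rfl | hu'
      · exact hhv
      · have := (List.pairwise_cons.mp hp).1 u hu'
        omega

lemma pvMaxStep_getD (l : List Nat) (i r v : Nat) (hi : i < l.length) :
    ((if v > l.getD i 0 then l.set i v else l).getD r 0)
      = if r = i then max (l.getD r 0) v else l.getD r 0 := by
  by_cases hri : r = i
  · subst hri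
    rw [if_pos rfl]
    by_cases hv : v > l.getD r 0
    · rw [if_pos hv, List.getD_eq_getElem?_getD, List.getElem?_set, if_pos rfl, if_pos hi]
      simp only [Option.getD_some]
      omega
    · rw [if_neg hv]
      omega
  · rw [if_neg hri]
    by_cases hv : v > l.getD i 0
    · rw [if_pos hv, List.getD_eq_getElem?_getD, List.getD_eq_getElem?_getD, List.getElem?_set,
        if_neg (fun h : i = r => hri h.symm)]
    · rw [if_neg hv]

lemma pvGroupFold :
    ∀ (g : List ((Int × Nat × Nat) × Nat)) (rb cb : List Nat) (best : Nat),
      (∀ p ∈ g, p.1.2.1 < rb.length ∧ p.1.2.2 < cb.length) →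
      ∀ res, res = g.foldl (fun (st : List Nat × List Nat × Nat) p =>
          (if p.2 > st.1.getD p.1.2.1 0 then st.1.set p.1.2.1 p.2 else st.1,
           if p.2 > st.2.1.getD p.1.2.2 0 then st.2.1.set p.1.2.2 p.2 else st.2.1,
           if p.2 > st.2.2 then p.2 else st.2.2)) (rb, cb, best) →
      res.1.length = rb.length ∧ res.2.1.length = cb.length
      ∧ (∀ r, res.1.getD r 0 = max (rb.getD r 0)
            ((g.filter (fun p => p.1.2.1 == r)).foldl (fun a p => max a p.2) 0))
      ∧ (∀ c, res.2.1.getD c 0 = max (cb.getD c 0)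
            ((g.filter (fun p => p.1.2.2 == c)).foldl (fun a p => max a p.2) 0))
      ∧ res.2.2 = max best (g.foldl (fun a p => max a p.2) 0) := by
  intro g
  induction g with
  | nil =>
    intro rb cb best _ res hres
    subst hres
    simp
  | cons p g ih =>
    intro rb cb best hb res hres
    have hp := hb p (by simp)
    have hlen1 : (if p.2 > rb.getD p.1.2.1 0 then rb.set p.1.2.1 p.2 else rb).length = rb.length := by
      split_ifs <;> simp [List.length_set]
    have hlen2 : (if p.2 > cb.getD p.1.2.2 0 then cb.set p.1.2.2 p.2 else cb).length = cb.length := by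
      split_ifs <;> simp [List.length_set]
    have ihres := ih (if p.2 > rb.getD p.1.2.1 0 then rb.set p.1.2.1 p.2 else rb)
        (if p.2 > cb.getD p.1.2.2 0 then cb.set p.1.2.2 p.2 else cb)
        (if p.2 > best then p.2 else best)
        (by
          intro q hq
          have h2 := hb q (List.mem_cons_of_mem _ hq)
          rw [hlen1, hlen2]
          exact h2)
        res (by rw [hres, List.foldl_cons])
    refine ⟨by rw [ihres.1, hlen1], by rw [ihres.2.1, hlen2], ?_, ?_, ?_⟩
    · intro r
      rw [ihres.2.2.1 r, pvMaxStep_getD rb p.1.2.1 r p.2 hp.1, List.filter_cons]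
      by_cases hrow : p.1.2.1 = r
      · rw [if_pos hrow.symm]
        have hbeq : (p.1.2.1 == r) = true := by simp [hrow]
        rw [if_pos hbeq, List.foldl_cons]
        rw [foldl_max_init (f := fun q : (Int × Nat × Nat) × Nat => q.2) _ (max 0 p.2)]
        omega
      · rw [if_neg (fun h : r = p.1.2.1 => hrow h.symm)]
        rw [if_neg (by simp [hrow] : ¬((p.1.2.1 == r) = true))]
    · intro c
      rw [ihres.2.2.2.1 c, pvMaxStep_getD cb p.1.2.2 c p.2 hp.2, List.filter_cons]
      by_cases hcol : p.1.2.2 = c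
      · rw [if_pos hcol.symm]
        have hbeq : (p.1.2.2 == c) = true := by simp [hcol]
        rw [if_pos hbeq, List.foldl_cons]
        rw [foldl_max_init (f := fun q : (Int × Nat × Nat) × Nat => q.2) _ (max 0 p.2)]
        omega
      · rw [if_neg (fun h : c = p.1.2.2 => hcol h.symm)]
        rw [if_neg (by simp [hcol] : ¬((p.1.2.2 == c) = true))]
    · rw [ihres.2.2.2.2, List.foldl_cons]
      rw [foldl_max_init (f := fun q : (Int × Nat × Nat) × Nat => q.2) _ (max 0 p.2)]
      split_ifs <;> omega

-- list max over a group of (cell, value) pairs, as a Finset sup over its coordinates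
lemma pvListMax_to_sup (mat : List (List Int)) (m n : Nat)
    (l : List (Int × Nat × Nat)) (dfun : (Int × Nat × Nat) → Nat)
    (hd : ∀ u ∈ l, dfun u = pvG mat m n u.2.1 u.2.2) :
    (l.map (fun u => (u, dfun u))).foldl (fun a p => max a p.2) 0
      = (pvPairs l).toFinset.sup (fun q => pvG mat m n q.1 q.2) := by
  rw [List.foldl_map]
  have h1 : l.foldl (fun a u => max a (dfun u)) 0
      = l.foldl (fun a u => max a (pvG mat m n u.2.1 u.2.2)) 0 :=
    foldl_max_congr_mem l _ _ hd 0
  rw [h1]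
  have h2 : l.foldl (fun a u => max a (pvG mat m n u.2.1 u.2.2)) 0
      = (pvPairs l).foldl (fun a q => max a (pvG mat m n q.1 q.2)) 0 := by
    unfold pvPairs
    rw [List.foldl_map]
  rw [h2, list_max_eq_sup]

lemma pvProcess_correct (mat : List (List Int)) (m n : Nat) :
    ∀ fuel (rest : List (Int × Nat × Nat)) (rb cb : List Nat) (best : Nat),
      rest.length < fuel →
      pvGood mat m n rest →
      rest.Pairwise (fun a b => b.1 ≤ a.1) →
      (∀ t ∈ rest, ∀ p ∈ pvDone mat m n rest, pvMatv mat p.1 p.2 > t.1) →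
      rb.length = m → cb.length = n →
      (∀ r, rb.getD r 0 = ((pvDone mat m n rest).filter (fun p => p.1 = r)).sup
          (fun p => pvG mat m n p.1 p.2)) →
      (∀ c, cb.getD c 0 = ((pvDone mat m n rest).filter (fun p => p.2 = c)).sup
          (fun p => pvG mat m n p.1 p.2)) →
      best = (pvDone mat m n rest).sup (fun p => pvG mat m n p.1 p.2) →
      pvProcess fuel rest rb cb best = pvAllSup mat m n := by
  intro fuel
  induction fuel with
  | zero =>
    intro rest _ _ _ h
    omega
  | succ fuel ih =>
    intro rest rb cb best hlen hgood hpw hsep hrbl hcbl hrb hcb hbest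
    cases rest with
    | nil =>
      have hD : pvDone mat m n [] = Finset.range m ×ˢ Finset.range n := by
        unfold pvDone
        simp
      simp only [pvProcess]
      rw [hbest, hD]
      unfold pvAllSup
      rfl
    | cons t ts =>
      have hle : ∀ u ∈ t :: ts, u.1 ≤ t.1 := by
        intro u hu
        rcases List.mem_cons.mp hu with rfl | hu'
        · exact le_refl _
        · exact (List.pairwise_cons.mp hpw).1 u hu'
      have hgv : ∀ u ∈ (t :: ts).takeWhile (fun u => u.1 == t.1), u.1 = t.1 := by
        intro u hu
        have h := @List.mem_takeWhile_imp _ (fun u : Int × Nat × Nat => u.1 == t.1) (t :: ts) u hu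
        exact beq_iff_eq.mp h
      have hgood_g : ∀ u ∈ (t :: ts).takeWhile (fun u => u.1 == t.1),
          u.2.1 < m ∧ u.2.2 < n ∧ u.1 = pvMatv mat u.2.1 u.2.2 :=
        fun u hu => hgood u ((List.takeWhile_sublist _).subset hu)
      have hrst_lt : ∀ u ∈ (t :: ts).dropWhile (fun u => u.1 == t.1), u.1 < t.1 :=
        pvDropWhile_lt t.1 (t :: ts) hpw hle
      have hchar : ∀ p : Nat × Nat, p ∈ pvDone mat m n (t :: ts) ↔
          (p.1 < m ∧ p.2 < n ∧ pvMatv mat p.1 p.2 > t.1) := by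
        intro p
        constructor
        · intro hp
          have hb := hp
          unfold pvDone at hb
          rw [Finset.mem_filter, Finset.mem_product, Finset.mem_range, Finset.mem_range] at hb
          exact ⟨hb.1.1, hb.1.2, hsep t (by simp) p hp⟩
        · rintro ⟨h1, h2, h3⟩
          unfold pvDone
          rw [Finset.mem_filter, Finset.mem_product, Finset.mem_range, Finset.mem_range]
          refine ⟨⟨h1, h2⟩, fun hmem => ?_⟩
          have := hle _ hmem
          simp only at this
          omega
      have hDone' : pvDone mat m n ((t :: ts).dropWhile (fun u => u.1 == t.1))
          = pvDone mat m n (t :: ts)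
            ∪ (pvPairs ((t :: ts).takeWhile (fun u => u.1 == t.1))).toFinset := by
        ext p
        simp only [pvDone, Finset.mem_union, Finset.mem_filter, Finset.mem_product,
          Finset.mem_range, List.mem_toFinset, pvPairs, List.mem_map]
        constructor
        · rintro ⟨⟨h1, h2⟩, h3⟩
          by_cases hmem : (pvMatv mat p.1 p.2, p.1, p.2) ∈ t :: ts
          · right
            rw [← List.takeWhile_append_dropWhile (p := fun u => u.1 == t.1) (l := t :: ts)] at hmem
            rcases List.mem_append.mp hmem with hg | hr
            · exact ⟨_, hg, rfl⟩
            · exact absurd hr h3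
          · left
            exact ⟨⟨h1, h2⟩, hmem⟩
        · rintro (⟨⟨h1, h2⟩, h3⟩ | ⟨u, hu, hup⟩)
          · exact ⟨⟨h1, h2⟩, fun hmem => h3 ((List.dropWhile_sublist _).subset hmem)⟩
          · obtain ⟨hum, hun, huv⟩ := hgood_g u hu
            have hp1 : p.1 = u.2.1 := by rw [← hup]
            have hp2 : p.2 = u.2.2 := by rw [← hup]
            have hv : pvMatv mat p.1 p.2 = t.1 := by
              rw [hp1, hp2, ← huv, hgv u hu]
            refine ⟨⟨hp1 ▸ hum, hp2 ▸ hun⟩, fun hmem => ?_⟩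
            have := hrst_lt _ hmem
            simp only at this
            omega
      have hrowsup : ∀ u ∈ (t :: ts).takeWhile (fun u => u.1 == t.1),
          rb.getD u.2.1 0 = ((Finset.range n).filter (fun c' => pvMatv mat u.2.1 c' > t.1)).sup
            (fun c' => pvG mat m n u.2.1 c') := by
        intro u hu
        obtain ⟨hum, hun, huv⟩ := hgood_g u hu
        rw [hrb u.2.1]
        have himg : (pvDone mat m n (t :: ts)).filter (fun p => p.1 = u.2.1)
            = ((Finset.range n).filter (fun c' => pvMatv mat u.2.1 c' > t.1)).image
                (fun c' => (u.2.1, c')) := by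
          ext q
          simp only [Finset.mem_filter, Finset.mem_image, Finset.mem_range]
          constructor
          · rintro ⟨hq, hq1⟩
            obtain ⟨h1, h2, h3⟩ := (hchar q).mp hq
            refine ⟨q.2, ⟨h2, by rw [← hq1]; exact h3⟩, by rw [← hq1]⟩
          · rintro ⟨c', ⟨hc', hv⟩, rfl⟩
            exact ⟨(hchar _).mpr ⟨hum, hc', hv⟩, rfl⟩
        rw [himg, Finset.sup_image]
        rfl
      have hcolsup : ∀ u ∈ (t :: ts).takeWhile (fun u => u.1 == t.1),
          cb.getD u.2.2 0 = ((Finset.range m).filter (fun r' => pvMatv mat r' u.2.2 > t.1)).sup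
            (fun r' => pvG mat m n r' u.2.2) := by
        intro u hu
        obtain ⟨hum, hun, huv⟩ := hgood_g u hu
        rw [hcb u.2.2]
        have himg : (pvDone mat m n (t :: ts)).filter (fun p => p.2 = u.2.2)
            = ((Finset.range m).filter (fun r' => pvMatv mat r' u.2.2 > t.1)).image
                (fun r' => (r', u.2.2)) := by
          ext q
          simp only [Finset.mem_filter, Finset.mem_image, Finset.mem_range]
          constructor
          · rintro ⟨hq, hq1⟩
            obtain ⟨h1, h2, h3⟩ := (hchar q).mp hq
            refine ⟨q.1, ⟨h1, by rw [← hq1]; exact h3⟩, by rw [← hq1]⟩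
          · rintro ⟨r', ⟨hr', hv⟩, rfl⟩
            exact ⟨(hchar _).mpr ⟨hr', hun, hv⟩, rfl⟩
        rw [himg, Finset.sup_image]
        rfl
      have hd : ∀ u ∈ (t :: ts).takeWhile (fun u => u.1 == t.1),
          1 + max (rb.getD u.2.1 0) (cb.getD u.2.2 0) = pvG mat m n u.2.1 u.2.2 := by
        intro u hu
        obtain ⟨hum, hun, huv⟩ := hgood_g u hu
        rw [hrowsup u hu, hcolsup u hu, pvG_closed mat m n u.2.1 u.2.2 hum hun]
        unfold pvRowSup pvColSup
        rw [← huv, hgv u hu]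
      -- unfold one step of the loop
      simp only [pvProcess]
      rw [pvZipSelfMap]
      have hgf := pvGroupFold
        (((t :: ts).takeWhile (fun u => u.1 == t.1)).map
          (fun u => (u, 1 + max (rb.getD u.2.1 0) (cb.getD u.2.2 0))))
        rb cb best
        (by
          rintro p hp
          obtain ⟨u, hu, rfl⟩ := List.mem_map.mp hp
          obtain ⟨hum, hun, _⟩ := hgood_g u hu
          rw [hrbl, hcbl]
          exact ⟨hum, hun⟩)
        _ rfl
      -- the three list-max pieces, as Finset sups
      have hmaxall : (((t :: ts).takeWhile (fun u => u.1 == t.1)).map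
            (fun u => (u, 1 + max (rb.getD u.2.1 0) (cb.getD u.2.2 0)))).foldl
              (fun a p => max a p.2) 0
          = (pvPairs ((t :: ts).takeWhile (fun u => u.1 == t.1))).toFinset.sup
              (fun q => pvG mat m n q.1 q.2) :=
        pvListMax_to_sup mat m n _ _ hd
      have hmaxrow : ∀ r, ((((t :: ts).takeWhile (fun u => u.1 == t.1)).map
            (fun u => (u, 1 + max (rb.getD u.2.1 0) (cb.getD u.2.2 0)))).filter
              (fun p => p.1.2.1 == r)).foldl (fun a p => max a p.2) 0
          = ((pvPairs ((t :: ts).takeWhile (fun u => u.1 == t.1))).toFinset.filter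
              (fun q => q.1 = r)).sup (fun q => pvG mat m n q.1 q.2) := by
        intro r
        rw [List.filter_map]
        have e1 : ((fun p : (Int × Nat × Nat) × Nat => p.1.2.1 == r) ∘
            (fun u => (u, 1 + max (rb.getD u.2.1 0) (cb.getD u.2.2 0))))
              = (fun u : Int × Nat × Nat => u.2.1 == r) := rfl
        rw [e1]
        rw [pvListMax_to_sup mat m n _ _
          (fun u hu => hd u (List.mem_of_mem_filter hu))]
        congr 1
        unfold pvPairs
        have e2 : ((fun q : Nat × Nat => q.1 == r) ∘ (fun t : Int × Nat × Nat => (t.2.1, t.2.2)))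
            = (fun u : Int × Nat × Nat => u.2.1 == r) := rfl
        rw [← e2, ← List.filter_map, List.toFinset_filter]
        apply Finset.filter_congr
        intro q _
        simp
      have hmaxcol : ∀ c, ((((t :: ts).takeWhile (fun u => u.1 == t.1)).map
            (fun u => (u, 1 + max (rb.getD u.2.1 0) (cb.getD u.2.2 0)))).filter
              (fun p => p.1.2.2 == c)).foldl (fun a p => max a p.2) 0
          = ((pvPairs ((t :: ts).takeWhile (fun u => u.1 == t.1))).toFinset.filter
              (fun q => q.2 = c)).sup (fun q => pvG mat m n q.1 q.2) := by
        intro c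
        rw [List.filter_map]
        have e1 : ((fun p : (Int × Nat × Nat) × Nat => p.1.2.2 == c) ∘
            (fun u => (u, 1 + max (rb.getD u.2.1 0) (cb.getD u.2.2 0))))
              = (fun u : Int × Nat × Nat => u.2.2 == c) := rfl
        rw [e1]
        rw [pvListMax_to_sup mat m n _ _
          (fun u hu => hd u (List.mem_of_mem_filter hu))]
        congr 1
        unfold pvPairs
        have e2 : ((fun q : Nat × Nat => q.2 == c) ∘ (fun t : Int × Nat × Nat => (t.2.1, t.2.2)))
            = (fun u : Int × Nat × Nat => u.2.2 == c) := rfl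
        rw [← e2, ← List.filter_map, List.toFinset_filter]
        apply Finset.filter_congr
        intro q _
        simp
      -- apply the induction hypothesis to the remaining cells
      apply ih
      · have he : (t :: ts).dropWhile (fun u => u.1 == t.1)
            = ts.dropWhile (fun u => u.1 == t.1) :=
          List.dropWhile_cons_of_pos (by simp)
        have := (List.dropWhile_sublist (l := ts) (fun u => u.1 == t.1)).length_le
        simp only [List.length_cons] at hlen
        rw [he]
        omega
      · exact fun u hu => hgood u ((List.dropWhile_sublist _).subset hu)
      · exact hpw.sublist (List.dropWhile_sublist _)
      · intro t' ht' p hp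
        rw [hDone'] at hp
        rcases Finset.mem_union.mp hp with hp1 | hp2
        · have h3 := ((hchar p).mp hp1).2.2
          have h4 := hrst_lt t' ht'
          omega
        · obtain ⟨u, hu, hup⟩ := List.mem_map.mp (List.mem_toFinset.mp hp2)
          obtain ⟨hum, hun, huv⟩ := hgood_g u hu
          have hp1 : p.1 = u.2.1 := by rw [← hup]
          have hp2' : p.2 = u.2.2 := by rw [← hup]
          have hv : pvMatv mat p.1 p.2 = t.1 := by
            rw [hp1, hp2', ← huv, hgv u hu]
          have h4 := hrst_lt t' ht'
          omega
      · rw [hgf.1, hrbl]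
      · rw [hgf.2.1, hcbl]
      · intro r
        rw [hgf.2.2.1 r, hmaxrow r, hDone', Finset.filter_union, Finset.sup_union, hrb r]
      · intro c
        rw [hgf.2.2.2.1 c, hmaxcol c, hDone', Finset.filter_union, Finset.sup_union, hcb c]
      · rw [hgf.2.2.2.2, hmaxall, hDone', Finset.sup_union, hbest]

lemma pvReplicateGetD (m r : Nat) : (List.replicate m (0 : Nat)).getD r 0 = 0 := by
  rw [List.getD_eq_getElem?_getD, List.getElem?_replicate]
  split_ifs <;> rfl

lemma maxB_eq_sup (mat : List (List Int)) :
    maxIncreasingCells_alt mat = (pvAllSup mat mat.length (mat.headD []).length : Nat) := by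
  have hmem : ∀ x, x ∈ PySem.List.sorted
      ((List.range mat.length).flatMap (fun i => (List.range (mat.headD []).length).map
        (fun j => (pvMatv mat i j, i, j)))) (fun t => t.1) true
      ↔ x ∈ (List.range mat.length).flatMap (fun i => (List.range (mat.headD []).length).map
        (fun j => (pvMatv mat i j, i, j))) :=
    fun x => PySem.List.mem_sorted _ _ _ x
  have hgood : pvGood mat mat.length (mat.headD []).length
      (PySem.List.sorted ((List.range mat.length).flatMap
        (fun i => (List.range (mat.headD []).length).map (fun j => (pvMatv mat i j, i, j))))
        (fun t => t.1) true) := by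
    intro u hu
    rw [hmem u] at hu
    obtain ⟨i, hi, hu2⟩ := List.mem_flatMap.mp hu
    obtain ⟨j, hj, rfl⟩ := List.mem_map.mp hu2
    exact ⟨List.mem_range.mp hi, List.mem_range.mp hj, rfl⟩
  have hD : pvDone mat mat.length (mat.headD []).length
      (PySem.List.sorted ((List.range mat.length).flatMap
        (fun i => (List.range (mat.headD []).length).map (fun j => (pvMatv mat i j, i, j))))
        (fun t => t.1) true) = ∅ := by
    ext p
    simp only [pvDone, Finset.mem_filter, Finset.mem_product, Finset.mem_range,
      Finset.notMem_empty, iff_false]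
    rintro ⟨⟨h1, h2⟩, h3⟩
    apply h3
    rw [hmem]
    apply List.mem_flatMap.mpr
    exact ⟨p.1, List.mem_range.mpr h1, List.mem_map.mpr ⟨p.2, List.mem_range.mpr h2, rfl⟩⟩
  have h := pvProcess_correct mat mat.length (mat.headD []).length
    ((PySem.List.sorted ((List.range mat.length).flatMap
        (fun i => (List.range (mat.headD []).length).map (fun j => (pvMatv mat i j, i, j))))
        (fun t => t.1) true).length + 1)
    (PySem.List.sorted ((List.range mat.length).flatMap
        (fun i => (List.range (mat.headD []).length).map (fun j => (pvMatv mat i j, i, j))))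
        (fun t => t.1) true)
    (List.replicate mat.length 0) (List.replicate (mat.headD []).length 0) 0
    (by omega) hgood
    (PySem.List.sorted_pairwise_rev _ _)
    (by
      intro t ht p hp
      rw [hD] at hp
      exact absurd hp (Finset.notMem_empty p))
    (List.length_replicate) (List.length_replicate)
    (by intro r; rw [pvReplicateGetD, hD]; simp)
    (by intro c; rw [pvReplicateGetD, hD]; simp)
    (by rw [hD]; simp)
  show ((pvProcess _ _ _ _ _ : Nat) : Int) = _
  rw [h]

-- ===== VERDICT (by name: the statement is the Claim_ definition above) =====

theorem maxIncreasingCells_spec : Claim_equal_maxIncreasingCells := by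
  intro mat _ _
  unfold Spec_maxIncreasingCells
  rw [maxA_eq_sup, maxB_eq_sup]
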